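-- pv_equiv track=rewrite | github.com/CyberGriffith/ADBOY | adboy.py | _summarize_path
-- ===== SOURCE A (Python) =====
-- from typing import Any, DefaultDict, Dict, List, Optional, Set, Tuple
--
-- def _summarize_path(relations: List[str], target_name: str) -> str:
--     normalized = [r.upper().replace(" ", "") for r in relations]
--     if any(r in {"GENERICALL", "WRITEDACL", "GENERICWRITE", "ADDMEMBER"} for r in normalized):
--         return f"Dangerous control path reaches privileged target {target_name}."
--     if "ADDKEYCREDENTIALLINK" in normalized:
--         return f"Path includes shadow-credential style control toward {target_name}."
--     if "ALLOWEDTOACT" in normalized: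
--         return f"Path includes delegation-style control toward {target_name}."
--     if "GETCHANGES" in normalized or "GETCHANGESALL" in normalized:
--         return f"Path includes replication-related control toward {target_name}."
--     return f"Shortest privileged path reaches {target_name}."
-- ===== SOURCE B (Python) =====
-- _RANK = {
--     "GENERICALL": 0, "WRITEDACL": 0, "GENERICWRITE": 0, "ADDMEMBER": 0,
--     "ADDKEYCREDENTIALLINK": 1,
--     "ALLOWEDTOACT": 2,
--     "GETCHANGES": 3, "GETCHANGESALL": 3,
-- }
--
-- def _summarize_path(relations, target_name):
--     messages = [
--         f"Dangerous control path reaches privileged target {target_name}.",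
--         f"Path includes shadow-credential style control toward {target_name}.",
--         f"Path includes delegation-style control toward {target_name}.",
--         f"Path includes replication-related control toward {target_name}.",
--         f"Shortest privileged path reaches {target_name}.",
--     ]
--     best = 4
--     for r in relations:
--         best = min(best, _RANK.get(r.upper().replace(" ", ""), 4))
--     return messages[best]
-- ===== Notes on version B (the rewrite author's own statement) =====
-- stated objective: idiomatic
-- what changed: Replaced A's four sequential membership scans over the normalized list by a rank table (keyword -> priority) and one min-tracking pass, then a single indexed lookup into a message list.
import Mathlib
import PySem

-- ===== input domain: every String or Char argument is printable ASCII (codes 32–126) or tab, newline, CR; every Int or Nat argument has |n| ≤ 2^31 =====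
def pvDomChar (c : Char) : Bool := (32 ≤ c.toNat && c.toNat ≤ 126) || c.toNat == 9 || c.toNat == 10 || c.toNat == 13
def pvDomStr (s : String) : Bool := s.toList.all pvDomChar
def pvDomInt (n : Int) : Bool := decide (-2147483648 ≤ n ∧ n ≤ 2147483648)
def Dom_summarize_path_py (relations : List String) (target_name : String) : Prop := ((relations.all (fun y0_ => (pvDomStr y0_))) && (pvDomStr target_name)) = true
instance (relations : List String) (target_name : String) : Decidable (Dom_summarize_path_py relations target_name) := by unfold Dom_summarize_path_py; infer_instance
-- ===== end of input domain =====

-- B replaces A's four sequential membership scans with a rank table and one min-tracking pass (objective: idiomatic; same cost).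

-- ===== PORT A =====
def summarize_path_py (relations : List String) (target_name : String) : String :=
  let normalized := relations.map (fun r => PySem.Str.replace (PySem.Str.upper r) " " "")
  if normalized.any (fun r => r == "GENERICALL" || r == "WRITEDACL" || r == "GENERICWRITE" || r == "ADDMEMBER") then
    "Dangerous control path reaches privileged target " ++ target_name ++ "."
  else if normalized.contains "ADDKEYCREDENTIALLINK" then
    "Path includes shadow-credential style control toward " ++ target_name ++ "."
  else if normalized.contains "ALLOWEDTOACT" then
    "Path includes delegation-style control toward " ++ target_name ++ "."
  else if normalized.contains "GETCHANGES" || normalized.contains "GETCHANGESALL" then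
    "Path includes replication-related control toward " ++ target_name ++ "."
  else
    "Shortest privileged path reaches " ++ target_name ++ "."

-- ===== PORT B =====
def pvRankTable : PySem.Dict String Nat :=
  PySem.Dict.ofList [("GENERICALL", 0), ("WRITEDACL", 0), ("GENERICWRITE", 0), ("ADDMEMBER", 0),
    ("ADDKEYCREDENTIALLINK", 1), ("ALLOWEDTOACT", 2), ("GETCHANGES", 3), ("GETCHANGESALL", 3)]

def pvMessages (t : String) : List String :=
  ["Dangerous control path reaches privileged target " ++ t ++ ".",
   "Path includes shadow-credential style control toward " ++ t ++ ".",
   "Path includes delegation-style control toward " ++ t ++ ".",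
   "Path includes replication-related control toward " ++ t ++ ".",
   "Shortest privileged path reaches " ++ t ++ "."]

def summarize_path_py_alt (relations : List String) (target_name : String) : String :=
  let best := relations.foldl
    (fun best r => min best (pvRankTable.getD (PySem.Str.replace (PySem.Str.upper r) " " "") 4)) 4
  -- best ∈ [0,4], so messages[best] never raises; ported via pyGet?.getD
  (PySem.List.pyGet? (pvMessages target_name) (best : Int)).getD ""

-- ===== PRECONDITION & SPEC =====
def Spec_summarize_path_py (relations : List String) (target_name : String) (out : String) : Prop := out = summarize_path_py_alt relations target_name
instance (relations : List String) (target_name : String) (out : String) : Decidable (Spec_summarize_path_py relations target_name out) := by unfold Spec_summarize_path_py; infer_instance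

-- ===== CLAIM (what is proved, stated in full; the proofs are below) =====
def Claim_equal_summarize_path_py : Prop := ∀ (relations : List String) (target_name : String), Dom_summarize_path_py relations target_name → Spec_summarize_path_py relations target_name (summarize_path_py relations target_name)

-- ===== LEMMAS AND PROOFS =====

def pvNRank (r : String) : Nat :=
  if PySem.Str.replace (PySem.Str.upper r) " " "" = "GENERICALL" ∨
     PySem.Str.replace (PySem.Str.upper r) " " "" = "WRITEDACL" ∨
     PySem.Str.replace (PySem.Str.upper r) " " "" = "GENERICWRITE" ∨
     PySem.Str.replace (PySem.Str.upper r) " " "" = "ADDMEMBER" then 0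
  else if PySem.Str.replace (PySem.Str.upper r) " " "" = "ADDKEYCREDENTIALLINK" then 1
  else if PySem.Str.replace (PySem.Str.upper r) " " "" = "ALLOWEDTOACT" then 2
  else if PySem.Str.replace (PySem.Str.upper r) " " "" = "GETCHANGES" ∨
          PySem.Str.replace (PySem.Str.upper r) " " "" = "GETCHANGESALL" then 3
  else 4

def pvBest (l : List String) : Nat := l.foldl (fun b r => min b (pvNRank r)) 4

theorem pvRank_cases (s : String) :
    pvRankTable.getD s 4 =
      if s = "GENERICALL" ∨ s = "WRITEDACL" ∨ s = "GENERICWRITE" ∨ s = "ADDMEMBER" then 0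
      else if s = "ADDKEYCREDENTIALLINK" then 1
      else if s = "ALLOWEDTOACT" then 2
      else if s = "GETCHANGES" ∨ s = "GETCHANGESALL" then 3
      else 4 := by
  have h : pvRankTable = PySem.Dict.mk [("GENERICALL", 0), ("WRITEDACL", 0), ("GENERICWRITE", 0),
      ("ADDMEMBER", 0), ("ADDKEYCREDENTIALLINK", 1), ("ALLOWEDTOACT", 2), ("GETCHANGES", 3),
      ("GETCHANGESALL", 3)] := by rfl
  by_cases h1 : s = "GENERICALL"
  · subst h1; decide
  by_cases h2 : s = "WRITEDACL"
  · subst h2; decide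
  by_cases h3 : s = "GENERICWRITE"
  · subst h3; decide
  by_cases h4 : s = "ADDMEMBER"
  · subst h4; decide
  by_cases h5 : s = "ADDKEYCREDENTIALLINK"
  · subst h5; decide
  by_cases h6 : s = "ALLOWEDTOACT"
  · subst h6; decide
  by_cases h7 : s = "GETCHANGES"
  · subst h7; decide
  by_cases h8 : s = "GETCHANGESALL"
  · subst h8; decide
  rw [h, PySem.Dict.getD_eq_get?_getD]
  simp only [PySem.Dict.get?_mk_cons, beq_iff_eq]
  rw [if_neg (fun hc => h1 hc.symm), if_neg (fun hc => h2 hc.symm), if_neg (fun hc => h3 hc.symm),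
      if_neg (fun hc => h4 hc.symm), if_neg (fun hc => h5 hc.symm), if_neg (fun hc => h6 hc.symm),
      if_neg (fun hc => h7 hc.symm), if_neg (fun hc => h8 hc.symm),
      if_neg (show ¬(s = "GENERICALL" ∨ s = "WRITEDACL" ∨ s = "GENERICWRITE" ∨ s = "ADDMEMBER") by tauto),
      if_neg h5, if_neg h6,
      if_neg (show ¬(s = "GETCHANGES" ∨ s = "GETCHANGESALL") by tauto)]
  rfl

theorem pvNRank_le (r : String) : pvNRank r ≤ 4 := by
  unfold pvNRank; split_ifs <;> omega

theorem pvNRank_eq (r : String) :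
    pvNRank r =
      if PySem.Str.replace (PySem.Str.upper r) " " "" = "GENERICALL" ∨
         PySem.Str.replace (PySem.Str.upper r) " " "" = "WRITEDACL" ∨
         PySem.Str.replace (PySem.Str.upper r) " " "" = "GENERICWRITE" ∨
         PySem.Str.replace (PySem.Str.upper r) " " "" = "ADDMEMBER" then 0
      else if PySem.Str.replace (PySem.Str.upper r) " " "" = "ADDKEYCREDENTIALLINK" then 1
      else if PySem.Str.replace (PySem.Str.upper r) " " "" = "ALLOWEDTOACT" then 2
      else if PySem.Str.replace (PySem.Str.upper r) " " "" = "GETCHANGES" ∨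
              PySem.Str.replace (PySem.Str.upper r) " " "" = "GETCHANGESALL" then 3
      else 4 := rfl

theorem pvFoldl_min_init (l : List String) (a : Nat) (ha : a ≤ 4) :
    l.foldl (fun b r => min b (pvNRank r)) a = min a (pvBest l) := by
  induction l generalizing a with
  | nil => simp [pvBest]; omega
  | cons r l ih =>
    have hr := pvNRank_le r
    simp only [pvBest, List.foldl_cons]
    rw [ih (min a (pvNRank r)) (by omega), ih (min 4 (pvNRank r)) (by omega)]
    omega

theorem pvBest_cons (r : String) (l : List String) :
    pvBest (r :: l) = min (pvNRank r) (pvBest l) := by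
  have hr := pvNRank_le r
  have := pvFoldl_min_init l (min 4 (pvNRank r)) (by omega)
  simp only [pvBest, List.foldl_cons] at *
  omega

theorem pvBest_le (l : List String) : pvBest l ≤ 4 := by
  induction l with
  | nil => simp [pvBest]
  | cons r l ih => rw [pvBest_cons]; omega

theorem pvBest_le_iff (l : List String) (k : Nat) (hk : k < 4) :
    pvBest l ≤ k ↔ ∃ r ∈ l, pvNRank r ≤ k := by
  induction l with
  | nil => simp [pvBest]; omega
  | cons r l ih =>
    rw [pvBest_cons]
    simp only [min_le_iff, List.mem_cons, ih]
    constructor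
    · rintro (h | ⟨x, hx, hxk⟩)
      · exact ⟨r, Or.inl rfl, h⟩
      · exact ⟨x, Or.inr hx, hxk⟩
    · rintro ⟨x, (rfl | hx), hxk⟩
      · exact Or.inl hxk
      · exact Or.inr ⟨x, hx, hxk⟩

theorem pvOr4 {a b c d : Prop} : ((a ∨ b) ∨ c) ∨ d ↔ a ∨ b ∨ c ∨ d := by tauto

theorem pvAlt_eq (l : List String) (t : String) :
    summarize_path_py_alt l t = ((pvMessages t)[pvBest l]?).getD "" := by
  have hc : l.foldl (fun best r =>
        min best (pvRankTable.getD (PySem.Str.replace (PySem.Str.upper r) " " "") 4)) 4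
      = pvBest l := by
    apply PySem.List.foldl_congr_mem
    intro acc x _
    rw [pvRank_cases, pvNRank_eq]
  simp only [summarize_path_py_alt, hc, PySem.List.pyGet?_natCast]

theorem summarize_path_py_spec_aux (l : List String) (t : String) :
    summarize_path_py l t = summarize_path_py_alt l t := by
  rw [pvAlt_eq]
  rcases Classical.em (∃ r ∈ l, pvNRank r = 0) with h0 | h0
  · have hb : pvBest l = 0 := by
      have := (pvBest_le_iff l 0 (by omega)).mpr (by obtain ⟨r, hr, h⟩ := h0; exact ⟨r, hr, by omega⟩)
      omega
    obtain ⟨r, hr, h⟩ := h0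
    rw [pvNRank_eq r] at h
    have hA : (l.map (fun r => PySem.Str.replace (PySem.Str.upper r) " " "")).any
        (fun r => r == "GENERICALL" || r == "WRITEDACL" || r == "GENERICWRITE" || r == "ADDMEMBER") = true := by
      refine List.any_eq_true.mpr ⟨_, List.mem_map.mpr ⟨r, hr, rfl⟩, ?_⟩
      simp only [Bool.or_eq_true, beq_iff_eq]
      split_ifs at h with hc <;> first | omega | exact pvOr4.mpr hc
    rw [hb]
    simp only [summarize_path_py]
    rw [hA]
    rfl
  · have hb0 : pvBest l ≠ 0 := fun h => h0 (by
      have := (pvBest_le_iff l 0 (by omega)).mp (by omega)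
      obtain ⟨r, hr, hk⟩ := this; exact ⟨r, hr, by omega⟩)
    have hA : (l.map (fun r => PySem.Str.replace (PySem.Str.upper r) " " "")).any
        (fun r => r == "GENERICALL" || r == "WRITEDACL" || r == "GENERICWRITE" || r == "ADDMEMBER") = false := by
      simp only [List.any_map, List.any_eq_false]
      intro r hr
      by_contra hc
      simp only [Function.comp, Bool.or_eq_true, beq_iff_eq] at hc
      apply h0
      exact ⟨r, hr, by rw [pvNRank_eq r, if_pos (pvOr4.mp hc)]⟩
    rcases Classical.em (∃ r ∈ l, pvNRank r = 1) with h1 | h1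
    · have hb : pvBest l = 1 := by
        have := (pvBest_le_iff l 1 (by omega)).mpr (by obtain ⟨r, hr, h⟩ := h1; exact ⟨r, hr, by omega⟩)
        omega
      obtain ⟨r, hr, h⟩ := h1
      rw [pvNRank_eq r] at h
      have hc1 : (l.map (fun r => PySem.Str.replace (PySem.Str.upper r) " " "")).contains "ADDKEYCREDENTIALLINK" = true := by
        simp only [List.contains_eq_mem, decide_eq_true_eq, List.mem_map]
        refine ⟨r, hr, ?_⟩
        split_ifs at h with hd1 hd2 <;> first | omega | exact hd2
      rw [hb]
      simp only [summarize_path_py]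
      rw [hA, hc1]
      rfl
    · have hmem : ∀ X : String,
          (l.map (fun r => PySem.Str.replace (PySem.Str.upper r) " " "")).contains X = true ↔
          ∃ r ∈ l, PySem.Str.replace (PySem.Str.upper r) " " "" = X := by
        intro X
        simp only [List.contains_eq_mem, decide_eq_true_eq, List.mem_map]
      have hc1 : (l.map (fun r => PySem.Str.replace (PySem.Str.upper r) " " "")).contains "ADDKEYCREDENTIALLINK" = false := by
        rw [← Bool.not_eq_true, hmem]
        rintro ⟨r, hr, h⟩
        apply h1; refine ⟨r, hr, ?_⟩
        rw [pvNRank_eq r, h]; simp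
      rcases Classical.em (∃ r ∈ l, pvNRank r = 2) with h2 | h2
      · have hb : pvBest l = 2 := by
          have h21 : pvBest l ≤ 2 := (pvBest_le_iff l 2 (by omega)).mpr
            (by obtain ⟨r, hr, h⟩ := h2; exact ⟨r, hr, by omega⟩)
          have hne1 : pvBest l ≠ 1 := fun hb1 => by
            have := (pvBest_le_iff l 1 (by omega)).mp (by omega)
            obtain ⟨r, hr, hk⟩ := this
            rcases Nat.lt_or_ge (pvNRank r) 1 with hlt | hge
            · exact h0 ⟨r, hr, by omega⟩
            · exact h1 ⟨r, hr, by omega⟩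
          omega
        obtain ⟨r, hr, h⟩ := h2
        rw [pvNRank_eq r] at h
        have hc2 : (l.map (fun r => PySem.Str.replace (PySem.Str.upper r) " " "")).contains "ALLOWEDTOACT" = true := by
          rw [hmem]
          refine ⟨r, hr, ?_⟩
          split_ifs at h with hd1 hd2 hd3 <;> first | omega | exact hd3
        rw [hb]
        simp only [summarize_path_py]
        rw [hA, hc1, hc2]
        rfl
      · have hc2 : (l.map (fun r => PySem.Str.replace (PySem.Str.upper r) " " "")).contains "ALLOWEDTOACT" = false := by
          rw [← Bool.not_eq_true, hmem]
          rintro ⟨r, hr, h⟩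
          apply h2; refine ⟨r, hr, ?_⟩
          rw [pvNRank_eq r, h]; simp
        rcases Classical.em (∃ r ∈ l, pvNRank r = 3) with h3 | h3
        · have hb : pvBest l = 3 := by
            have h31 : pvBest l ≤ 3 := (pvBest_le_iff l 3 (by omega)).mpr
              (by obtain ⟨r, hr, h⟩ := h3; exact ⟨r, hr, by omega⟩)
            have hne : ¬ pvBest l ≤ 2 := fun hb' => by
              obtain ⟨r, hr, hk⟩ := (pvBest_le_iff l 2 (by omega)).mp hb'
              have hkr : pvNRank r = 0 ∨ pvNRank r = 1 ∨ pvNRank r = 2 := by omega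
              rcases hkr with hkr | hkr | hkr
              · exact h0 ⟨r, hr, hkr⟩
              · exact h1 ⟨r, hr, hkr⟩
              · exact h2 ⟨r, hr, hkr⟩
            omega
          obtain ⟨r, hr, h⟩ := h3
          rw [pvNRank_eq r] at h
          have hc3 : ((l.map (fun r => PySem.Str.replace (PySem.Str.upper r) " " "")).contains "GETCHANGES" ||
              (l.map (fun r => PySem.Str.replace (PySem.Str.upper r) " " "")).contains "GETCHANGESALL") = true := by
            rw [Bool.or_eq_true, hmem, hmem]
            split_ifs at h with hh1 hh2 hh3 hh4
            all_goals try omega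
            rcases hh4 with hh | hh
            · exact Or.inl ⟨r, hr, hh⟩
            · exact Or.inr ⟨r, hr, hh⟩
          rw [hb]
          simp only [summarize_path_py]
          rw [hA, hc1, hc2, hc3]
          rfl
        · have hb : pvBest l = 4 := by
            have h44 := pvBest_le l
            have : ¬ pvBest l ≤ 3 := fun hle => by
              obtain ⟨r, hr, hk⟩ := (pvBest_le_iff l 3 (by omega)).mp hle
              have hkr : pvNRank r = 0 ∨ pvNRank r = 1 ∨ pvNRank r = 2 ∨ pvNRank r = 3 := by omega
              rcases hkr with hkr | hkr | hkr | hkr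
              · exact h0 ⟨r, hr, hkr⟩
              · exact h1 ⟨r, hr, hkr⟩
              · exact h2 ⟨r, hr, hkr⟩
              · exact h3 ⟨r, hr, hkr⟩
            omega
          have hc3 : ∀ X, X = "GETCHANGES" ∨ X = "GETCHANGESALL" →
              (l.map (fun r => PySem.Str.replace (PySem.Str.upper r) " " "")).contains X = false := by
            intro X hX
            rw [← Bool.not_eq_true, hmem]
            rintro ⟨r, hr, h⟩
            apply h3; refine ⟨r, hr, ?_⟩
            rw [pvNRank_eq r, h]
            rcases hX with rfl | rfl <;> simp
          rw [hb]
          simp only [summarize_path_py]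
          rw [hA, hc1, hc2, hc3 _ (Or.inl rfl), hc3 _ (Or.inr rfl)]
          rfl

-- ===== VERDICT (by name: the statement is the Claim_ definition above) =====
theorem summarize_path_py_spec : Claim_equal_summarize_path_py := by
  intro relations target_name _
  unfold Spec_summarize_path_py
  exact summarize_path_py_spec_aux relations target_name
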